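-- pv_equiv track=rewrite | github.com/tmek1244/AoC2023 | day14/main.py | tilt_down
-- ===== SOURCE A (Python) =====
-- def tilt_down(input):
--     for col in range(len(input[0])):
--         counter = len(input) - 1
--         for row in range(len(input) - 1, -1, -1):
--             if input[row][col] == '#':
--                 counter = row - 1
--             if input[row][col] == 'O':
--                 input[row][col] = '.'
--                 input[counter][col] = 'O'
--                 counter -= 1
--     return input
-- ===== SOURCE B (Python) =====
-- def _flush(seg):
--     # settle one wall-free segment: non-rock cells keep their value ('O' -> '.'),
--     # and the segment's rocks pile up at its bottom
--     k = seg.count('O')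
--     return ['.' if x == 'O' else x for x in seg[:len(seg) - k]] + ['O'] * k
--
-- def _tilt_col(cells):
--     # one top-to-bottom pass: gather cells of the current wall-free segment,
--     # flush it at each '#' wall and once at the end
--     out, seg = [], []
--     for x in cells:
--         if x == '#':
--             out += _flush(seg) + ['#']
--             seg = []
--         else:
--             seg.append(x)
--     return out + _flush(seg)
--
-- def tilt_down(input):
--     for c in range(len(input[0])):
--         new = _tilt_col([row[c] for row in input])
--         for r in range(len(input)):
--             input[r][c] = new[r]
--     return input
-- ===== Notes on version B (the rewrite author's own statement) =====
-- stated objective: alternative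
-- what changed: A compacts each column in place, scanning bottom-up with a moving cursor (counter) and writing '.'/'O' pairs as it meets each rock; B instead makes one top-down pass per column that splits it into '#'-separated segments, counts the rocks in each segment, and rebuilds the segment with the rocks piled at its bottom.
import Mathlib
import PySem

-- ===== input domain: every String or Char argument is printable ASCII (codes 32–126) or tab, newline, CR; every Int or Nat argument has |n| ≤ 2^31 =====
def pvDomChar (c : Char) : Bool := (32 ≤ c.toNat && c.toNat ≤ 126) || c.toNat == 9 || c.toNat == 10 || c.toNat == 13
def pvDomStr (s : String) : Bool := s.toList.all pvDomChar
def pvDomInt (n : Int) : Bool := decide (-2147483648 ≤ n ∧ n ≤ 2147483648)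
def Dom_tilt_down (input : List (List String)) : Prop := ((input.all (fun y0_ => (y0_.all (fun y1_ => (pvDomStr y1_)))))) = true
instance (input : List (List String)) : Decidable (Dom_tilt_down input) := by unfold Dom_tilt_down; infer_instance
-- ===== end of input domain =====

-- B replaces A's bottom-up in-place cursor compaction by a one-pass segment split-and-rebuild
-- per column (objective: alternative decomposition, same cost). Both Pythons mutate `input`
-- in place identically and return it; the equivalence proved here is about the return value.

-- ===== PORT A =====
-- g[r][c] read with defaults; exact whenever the indices are in range (Pre_ guarantees this)
def pyCell (g : List (List String)) (r c : Int) : String :=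
  PySem.List.pyGetD (PySem.List.pyGetD g r []) c ""

-- 'g[r][c] = v': replace row r by that row with cell c set (Python's in-place write)
def pyPut (g : List (List String)) (r c : Int) (v : String) : List (List String) :=
  PySem.List.pySetD g r (PySem.List.pySetD (PySem.List.pyGetD g r []) c v)

def tilt_down (input : List (List String)) : List (List String) :=
  (PySem.List.pyRange 0 (PySem.List.len (PySem.List.pyGetD input 0 [])) 1).foldl
    (fun g col =>
      ((PySem.List.pyRange (PySem.List.len g - 1) (-1) (-1)).foldl
        (fun (st : List (List String) × Int) row =>
          let counter := if pyCell st.1 row col = "#" then row - 1 else st.2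
          if pyCell st.1 row col = "O" then
            (pyPut (pyPut st.1 row col ".") counter col "O", counter - 1)
          else (st.1, counter))
        (g, PySem.List.len g - 1)).1)
    input

-- ===== PORT B =====
-- _flush: settle one wall-free segment ('O' count k: keep/dot the upper cells, k rocks at the bottom)
def flushSeg (seg : List String) : List String :=
  let k := PySem.List.count seg "O"
  (seg.take (seg.length - k)).map (fun x => if x = "O" then "." else x) ++ List.replicate k "O"

-- _tilt_col: one pass over the column with accumulators (out, seg)
def tiltCol (cells : List String) : List String :=
  let st := cells.foldl
    (fun (st : List String × List String) x =>
      if x = "#" then (st.1 ++ flushSeg st.2 ++ ["#"], [])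
      else (st.1, st.2 ++ [x]))
    ([], [])
  st.1 ++ flushSeg st.2

def tilt_down_alt (input : List (List String)) : List (List String) :=
  (PySem.List.pyRange 0 (PySem.List.len (PySem.List.pyGetD input 0 [])) 1).foldl
    (fun g c =>
      let new := tiltCol (g.map (fun row => PySem.List.pyGetD row c ""))
      (PySem.List.pyRange 0 (PySem.List.len g) 1).foldl
        (fun g' r => pyPut g' r c (PySem.List.pyGetD new r "")) g)
    input

-- ===== PRECONDITION & SPEC =====
-- Pre_ excludes exactly the inputs where A raises IndexError: the empty grid (input[0]) and
-- grids with a row shorter than row 0 (input[row][col] for col < len(input[0])).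
def Pre_tilt_down (input : List (List String)) : Prop :=
  input ≠ [] ∧ ∀ row ∈ input, (input.headD []).length ≤ row.length
instance (input : List (List String)) : Decidable (Pre_tilt_down input) := by
  unfold Pre_tilt_down; infer_instance

def pvWitness_tilt_down : List (List String) :=
  [["O", ".", "."], [".", "#", "O"], ["O", "O", "."]]

def Spec_tilt_down (input : List (List String)) (out : List (List String)) : Prop := out = tilt_down_alt input
instance (input : List (List String)) (out : List (List String)) : Decidable (Spec_tilt_down input out) := by unfold Spec_tilt_down; infer_instance

-- ===== CLAIM (what is proved, stated in full; the proofs are below) =====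
def Claim_equal_tilt_down : Prop := ∀ (input : List (List String)), Dom_tilt_down input → Pre_tilt_down input → Spec_tilt_down input (tilt_down input)

-- ===== LEMMAS AND PROOFS =====

-- pure column-level recursion that A's inner loop performs (rows m-1 .. 0, moving cursor cnt)
def loopA : List String → Nat → Int → List String × Int
  | col, 0, cnt => (col, cnt)
  | col, m + 1, cnt =>
      let x := col.getD m ""
      let cnt1 := if x = "#" then (m : Int) - 1 else cnt
      if x = "O" then loopA ((col.set m ".").set cnt1.toNat "O") m (cnt1 - 1)
      else loopA col m cnt1

def mapDot (xs : List String) : List String := xs.map (fun x => if x = "O" then "." else x)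

def readCol (g : List (List String)) (c : Nat) : List String := g.map (fun row => row.getD c "")

def writeCol (g : List (List String)) (c : Nat) (vs : List String) : List (List String) :=
  List.zipWith (fun row v => row.set c v) g vs

lemma getD_at {α : Type} (a : List α) (x : α) (b : List α) (d : α) :
    (a ++ x :: b).getD a.length d = x := by simp [List.getD]

lemma set_at {α : Type} (a : List α) (x v : α) (b : List α) :
    (a ++ x :: b).set a.length v = a ++ v :: b := by simp

lemma take_append_take (A B : List String) (f t : Nat) (h : t ≤ A.length + f) :
    (A ++ B.take f).take t = (A ++ B).take t := by
  simp only [List.take_append, List.take_take]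
  congr 2
  omega

lemma loopA_seg : ∀ (seg : List String), "#" ∉ seg → ∀ (pre free : List String) (k : Nat), "O" ∉ free →
    loopA (pre ++ seg ++ free ++ List.replicate k "O") (pre.length + seg.length)
      (((pre.length + seg.length + free.length : Nat) : Int) - 1)
    = loopA (pre ++ (mapDot seg ++ free).take (seg.length + free.length - seg.count "O")
          ++ List.replicate (seg.count "O" + k) "O") pre.length
        (((pre.length + (seg.length + free.length - seg.count "O") : Nat) : Int) - 1) := by
  intro seg
  induction seg using List.reverseRecOn with
  | nil =>
      intro _ pre free k hfree
      simp [mapDot]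
  | append_singleton ys x ih =>
      intro hseg pre free k hfree
      have hys : "#" ∉ ys := fun hh => hseg (by simp [hh])
      have hx : x ≠ "#" := fun hh => hseg (by simp [hh])
      have hcys : ys.count "O" ≤ ys.length := List.count_le_length
      have hstep : pre.length + (ys ++ [x]).length = (pre.length + ys.length) + 1 := by
        simp; omega
      rw [hstep]
      have hcol : pre ++ (ys ++ [x]) ++ free ++ List.replicate k "O"
          = (pre ++ ys) ++ x :: (free ++ List.replicate k "O") := by simp
      rw [hcol]
      have hcnt : ((pre.length + ys.length + 1 + free.length : Nat) : Int) - 1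
          = ((pre.length + ys.length + free.length + 1 : Nat) : Int) - 1 := by
        omega
      rw [hcnt]
      have hlen : (pre ++ ys).length = pre.length + ys.length := by simp
      simp only [loopA]
      rw [← hlen, getD_at]
      by_cases hO : x = "O"
      · subst hO
        simp only [if_neg hx, reduceIte]
        rw [set_at]
        have htn : ((((pre ++ ys).length + free.length + 1 : Nat) : Int) - 1).toNat
            = (pre ++ ys).length + free.length := by omega
        rw [htn]
        have e2 : ((pre ++ ys) ++ "." :: (free ++ List.replicate k "O")).set
              ((pre ++ ys).length + free.length) "O"
            = (pre ++ ys) ++ (("." :: free).take free.length ++ List.replicate (k + 1) "O") := by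
          rcases free.eq_nil_or_concat with rfl | ⟨fl, z, rfl⟩
          · simpa [List.replicate_succ] using set_at (pre ++ ys) "." "O" (List.replicate k "O")
          · simp only [List.concat_eq_append] at *
            have h1 : (pre ++ ys) ++ "." :: ((fl ++ [z]) ++ List.replicate k "O")
                = ((pre ++ ys) ++ "." :: fl) ++ z :: List.replicate k "O" := by simp
            have h2 : (pre ++ ys).length + (fl ++ [z]).length
                = ((pre ++ ys) ++ "." :: fl).length := by simp; omega
            rw [h1, h2, set_at]
            simp [List.replicate_succ]
        rw [e2]
        have hfree' : "O" ∉ ("." :: free).take free.length := by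
          intro hh
          rcases List.mem_cons.1 (List.take_subset _ _ hh) with h | h
          · exact absurd h.symm (by decide)
          · exact hfree h
        have hshape : (pre ++ ys) ++ (("." :: free).take free.length ++ List.replicate (k + 1) "O")
            = pre ++ ys ++ ("." :: free).take free.length ++ List.replicate (k + 1) "O" := by simp
        rw [hshape, hlen]
        have hcnt2 : (((pre.length + ys.length + free.length + 1 : Nat) : Int)) - 1 - 1
            = ((pre.length + ys.length + (("." :: free).take free.length).length : Nat) : Int) - 1 := by
          simp only [List.length_take, List.length_cons]
          omega
        rw [hcnt2, ih hys pre (("." :: free).take free.length) (k + 1) hfree']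
        have hcount : (ys ++ ["O"]).count "O" = ys.count "O" + 1 := by simp
        have hmd : mapDot (ys ++ ["O"]) = mapDot ys ++ ["."] := by simp [mapDot]
        rw [hcount, hmd]
        have hamt : (ys ++ ["O"]).length + free.length - (ys.count "O" + 1)
            = ys.length + (("." :: free).take free.length).length - ys.count "O" := by
          simp only [List.length_take, List.length_cons, List.length_append, List.length_nil]
          omega
        rw [hamt]
        have h3 : (mapDot ys ++ ["."] ++ free) = mapDot ys ++ "." :: free := by simp
        rw [h3]
        rw [← take_append_take (mapDot ys) ("." :: free) free.length
          (ys.length + (("." :: free).take free.length).length - ys.count "O")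
          (by simp only [mapDot, List.length_map, List.length_take, List.length_cons]; omega)]
        rw [show ys.count "O" + 1 + k = ys.count "O" + (k + 1) by omega]
      · simp only [if_neg hx, if_neg hO]
        have hcol2 : pre ++ ys ++ x :: (free ++ List.replicate k "O")
            = pre ++ ys ++ (x :: free) ++ List.replicate k "O" := by simp
        rw [hcol2, hlen]
        have hcnt3 : ((pre.length + ys.length + free.length + 1 : Nat) : Int) - 1
            = ((pre.length + ys.length + (x :: free).length : Nat) : Int) - 1 := by
          simp only [List.length_cons]
          omega
        rw [hcnt3, ih hys pre (x :: free) k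
          (fun hh => (List.mem_cons.1 hh).elim (fun h => hO h.symm) hfree)]
        have hcount : (ys ++ [x]).count "O" = ys.count "O" := by
          simp [List.count_append, hO]
        have hmd : mapDot (ys ++ [x]) = mapDot ys ++ [x] := by
          simp [mapDot, hO]
        rw [hcount, hmd]
        have hamt : (ys ++ [x]).length + free.length - ys.count "O"
            = ys.length + (x :: free).length - ys.count "O" := by
          simp only [List.length_append, List.length_cons, List.length_nil]
          omega
        rw [hamt]
        have h3 : mapDot ys ++ [x] ++ free = mapDot ys ++ x :: free := by simp
        rw [h3]

lemma loopA_append : ∀ (m : Nat) (xs tail : List String) (cnt : Int),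
    m ≤ xs.length → (m : Int) - 1 ≤ cnt → cnt < (xs.length : Int) →
    loopA (xs ++ tail) m cnt = ((loopA xs m cnt).1 ++ tail, (loopA xs m cnt).2) := by
  intro m
  induction m with
  | zero => intro xs tail cnt _ _ _; simp [loopA]
  | succ m ih =>
      intro xs tail cnt hm hc1 hc2
      have hmx : m < xs.length := by omega
      simp only [loopA, List.getD_append _ _ _ _ hmx]
      by_cases hO : xs.getD m "" = "O"
      · have hneq : xs.getD m "" ≠ "#" := by rw [hO]; decide
        simp only [if_neg hneq, if_pos hO]
        have hcnn : 0 ≤ cnt := by omega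
        have hcn : cnt.toNat < xs.length := by omega
        rw [List.set_append_left _ _ hmx]
        rw [List.set_append_left _ _ (by simpa using hcn)]
        rw [ih _ tail _ (by simp; omega) (by omega) (by simp; omega)]
      · simp only [if_neg hO]
        by_cases hH : xs.getD m "" = "#"
        · simp only [if_pos hH]
          rw [ih _ tail _ (by omega) (by omega) (by omega)]
        · simp only [if_neg hH]
          rw [ih _ tail _ (by omega) (by omega) (by omega)]

lemma last_hash (col : List String) (h : "#" ∈ col) :
    ∃ pre seg, col = pre ++ "#" :: seg ∧ "#" ∉ seg := by
  induction col with
  | nil => simp at h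
  | cons a t ih =>
      by_cases ht : "#" ∈ t
      · obtain ⟨p, s, rfl, hs⟩ := ih ht
        exact ⟨a :: p, s, rfl, hs⟩
      · rcases List.mem_cons.1 h with rfl | hmem
        · exact ⟨[], t, rfl, ht⟩
        · exact absurd hmem ht

lemma tiltFold_no_hash : ∀ (cells : List String), "#" ∉ cells → ∀ (o s : List String),
    cells.foldl (fun (st : List String × List String) x =>
      if x = "#" then (st.1 ++ flushSeg st.2 ++ ["#"], []) else (st.1, st.2 ++ [x])) (o, s)
    = (o, s ++ cells) := by
  intro cells
  induction cells with
  | nil => intro _ o s; simp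
  | cons x t ih =>
      intro h o s
      have hx : x ≠ "#" := fun hh => h (by simp [hh])
      have ht : "#" ∉ t := fun hh => h (by simp [hh])
      simp only [List.foldl_cons, if_neg hx, ih ht]
      simp

lemma tiltFold_shift : ∀ (cells o s : List String),
    cells.foldl (fun (st : List String × List String) x =>
      if x = "#" then (st.1 ++ flushSeg st.2 ++ ["#"], []) else (st.1, st.2 ++ [x])) (o, s)
    = (o ++ (cells.foldl (fun (st : List String × List String) x =>
        if x = "#" then (st.1 ++ flushSeg st.2 ++ ["#"], []) else (st.1, st.2 ++ [x])) ([], s)).1,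
       (cells.foldl (fun (st : List String × List String) x =>
        if x = "#" then (st.1 ++ flushSeg st.2 ++ ["#"], []) else (st.1, st.2 ++ [x])) ([], s)).2) := by
  intro cells
  induction cells with
  | nil => intro o s; simp
  | cons x t ih =>
      intro o s
      by_cases hx : x = "#"
      · subst hx
        simp only [List.foldl_cons, reduceIte]
        rw [ih (o ++ flushSeg s ++ ["#"]) [], ih ([] ++ flushSeg s ++ ["#"]) []]
        simp
      · simp only [List.foldl_cons, if_neg hx]
        exact ih o (s ++ [x])

lemma tiltCol_no_hash (cells : List String) (h : "#" ∉ cells) : tiltCol cells = flushSeg cells := by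
  unfold tiltCol
  rw [tiltFold_no_hash cells h [] []]
  simp

lemma tiltCol_hash_split (xs ys : List String) :
    tiltCol (xs ++ "#" :: ys) = tiltCol xs ++ "#" :: tiltCol ys := by
  unfold tiltCol
  rw [List.foldl_append, List.foldl_cons]
  simp only [reduceIte]
  rw [tiltFold_shift]
  simp

lemma length_flushSeg (seg : List String) : (flushSeg seg).length = seg.length := by
  have hk : List.count "O" seg ≤ seg.length := List.count_le_length
  simp [flushSeg, PySem.List.count_eq]
  omega

lemma tiltFold_length : ∀ (cells o s : List String),
    ((cells.foldl (fun (st : List String × List String) x =>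
      if x = "#" then (st.1 ++ flushSeg st.2 ++ ["#"], []) else (st.1, st.2 ++ [x])) (o, s)).1).length
    + ((cells.foldl (fun (st : List String × List String) x =>
      if x = "#" then (st.1 ++ flushSeg st.2 ++ ["#"], []) else (st.1, st.2 ++ [x])) (o, s)).2).length
    = o.length + s.length + cells.length := by
  intro cells
  induction cells with
  | nil => intro o s; simp
  | cons x t ih =>
      intro o s
      by_cases hx : x = "#"
      · subst hx
        simp only [List.foldl_cons, reduceIte]
        rw [ih]
        have := length_flushSeg s
        simp
        omega
      · simp only [List.foldl_cons, if_neg hx]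
        rw [ih]
        simp
        omega

lemma length_tiltCol (cells : List String) : (tiltCol cells).length = cells.length := by
  unfold tiltCol
  have h := tiltFold_length cells [] []
  simp only [List.length_nil] at h
  simp only [List.length_append, length_flushSeg]
  omega

lemma loopA_tiltCol_aux (n : Nat) : ∀ col : List String, col.length ≤ n →
    (loopA col col.length ((col.length : Int) - 1)).1 = tiltCol col := by
  induction n with
  | zero =>
      intro col hc
      have : col = [] := List.eq_nil_of_length_eq_zero (by omega)
      subst this
      simp [loopA, tiltCol, flushSeg, PySem.List.count]
  | succ n ih =>
      intro col hc
      by_cases hmem : "#" ∈ col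
      · obtain ⟨pre, seg, rfl, hseg⟩ := last_hash col hmem
        have hsp := loopA_seg seg hseg (pre ++ ["#"]) [] 0 (by simp)
        simp only [List.append_nil, List.replicate_zero, Nat.add_zero, Nat.zero_add,
          List.length_append, List.length_cons, List.length_nil] at hsp
        -- normalize the list shapes
        have hshape : (pre ++ ["#"]) ++ seg = pre ++ "#" :: seg := by simp
        rw [hshape] at hsp
        have hm : (pre ++ "#" :: seg).length = (pre.length + 1) + seg.length := by simp; omega
        rw [hm]
        have hcnt : ((pre ++ "#" :: seg).length : Int) - 1
            = ((pre.length + 1 + seg.length : Nat) : Int) - 1 := by simp; omega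
        rw [hsp]
        -- one more loopA step consumes the "#" at index pre.length
        have hshape2 : pre ++ ["#"] ++ (mapDot seg).take (seg.length - seg.count "O")
              ++ List.replicate (seg.count "O") "O"
            = pre ++ "#" :: ((mapDot seg).take (seg.length - seg.count "O")
              ++ List.replicate (seg.count "O") "O") := by simp
        rw [hshape2]
        simp only [loopA]
        rw [getD_at]
        rw [if_neg (by decide : ¬("#" : String) = "O"), if_pos rfl]
        rw [loopA_append pre.length pre _ _ le_rfl (by omega) (by omega)]
        rw [ih pre (by simp at hc; omega)]
        rw [tiltCol_hash_split, tiltCol_no_hash seg hseg]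
        unfold flushSeg mapDot
        rw [PySem.List.count_eq]
        simp [List.map_take]
      · have h0 := loopA_seg col hmem [] [] 0 (by simp)
        simp only [List.nil_append, List.append_nil, List.replicate_zero, Nat.zero_add,
          Nat.add_zero, List.length_nil] at h0
        rw [h0]
        simp only [loopA]
        rw [tiltCol_no_hash col hmem]
        unfold flushSeg mapDot
        rw [PySem.List.count_eq]
        simp [List.map_take]

lemma loopA_tiltCol (col : List String) :
    (loopA col col.length ((col.length : Int) - 1)).1 = tiltCol col :=
  loopA_tiltCol_aux col.length col le_rfl

-- ===== grid-level lemmas =====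

lemma getElem_writeCol (g : List (List String)) (c : Nat) (vs : List String)
    (h : vs.length = g.length) (j : Nat) (hj : j < g.length) :
    (writeCol g c vs)[j]'(by simp [writeCol]; omega) = (g[j]).set c (vs[j]'(by omega)) := by
  simp [writeCol]

lemma map_length_writeCol (g : List (List String)) (c : Nat) (vs : List String)
    (h : vs.length = g.length) :
    (writeCol g c vs).map List.length = g.map List.length := by
  apply List.ext_getElem
  · simp [writeCol]; omega
  · intro j h1 h2
    simp [writeCol]

lemma writeCol_readCol (g : List (List String)) (c : Nat) (hc : ∀ row ∈ g, c < row.length) :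
    writeCol g c (readCol g c) = g := by
  unfold readCol
  apply List.ext_getElem
  · simp [writeCol]
  · intro j h1 h2
    have hcj : c < (g[j]).length := hc _ (List.getElem_mem h2)
    simp [writeCol]
    rw [List.getElem?_eq_getElem hcj]
    exact List.set_getElem_self hcj

lemma pyPut_writeCol (g : List (List String)) (c : Nat) (vs : List String)
    (h : vs.length = g.length) (i : Int) (hi : 0 ≤ i) (v : String) :
    pyPut (writeCol g c vs) i (c : Int) v = writeCol g c (vs.set i.toNat v) := by
  unfold pyPut
  have hwl : (writeCol g c vs).length = g.length := by simp [writeCol]; omega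
  have hwl2 : (writeCol g c (vs.set i.toNat v)).length = g.length := by simp [writeCol]; omega
  by_cases hir : i.toNat < g.length
  · rw [PySem.List.pyGetD_eq_getElem _ _ hi (by omega)]
    rw [PySem.List.pySetD_natCast]
    rw [PySem.List.pySetD_of_nonneg _ _ hi]
    have hg : (writeCol g c vs)[i.toNat]'(by omega) = (g[i.toNat]).set c (vs[i.toNat]'(by omega)) :=
      getElem_writeCol g c vs h i.toNat hir
    rw [hg, List.set_set]
    apply List.ext_getElem
    · simp; omega
    · intro t h1 h2
      have h2g : t < g.length := by omega
      by_cases ht : t = i.toNat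
      · subst ht
        rw [List.getElem_set_self (by omega)]
        rw [getElem_writeCol g c (vs.set i.toNat v) (by simp [h]) i.toNat hir]
        simp
      · rw [List.getElem_set_ne (show i.toNat ≠ t from fun hh => ht hh.symm)]
        rw [getElem_writeCol g c vs h t h2g, getElem_writeCol g c (vs.set i.toNat v) (by simp [h]) t h2g]
        congr 1
        rw [List.getElem_set_ne (show i.toNat ≠ t from fun hh => ht hh.symm)]
  · rw [PySem.List.pySetD_of_nonneg _ _ hi]
    rw [List.set_eq_of_length_le (by omega)]
    rw [List.set_eq_of_length_le (by omega)]

lemma pyCell_writeCol (g : List (List String)) (c : Nat) (vs : List String)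
    (h : vs.length = g.length) (j : Nat) (hj : j < g.length)
    (hc : ∀ row ∈ g, c < row.length) :
    pyCell (writeCol g c vs) (j : Int) (c : Int) = vs.getD j "" := by
  unfold pyCell
  have hwl : (writeCol g c vs).length = g.length := by simp [writeCol]; omega
  have e1 : (writeCol g c vs).getD j [] = (g[j]).set c (vs[j]'(by omega)) := by
    rw [List.getD_eq_getElem _ _ (by omega)]
    exact getElem_writeCol g c vs h j hj
  rw [PySem.List.pyGetD_natCast, PySem.List.pyGetD_natCast, e1]
  have hcj : c < (g[j]).length := hc _ (List.getElem_mem hj)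
  rw [List.getD_eq_getElem _ _ (by simpa using hcj)]
  rw [List.getElem_set_self (by simpa using hcj)]
  rw [List.getD_eq_getElem _ _ (by omega)]

lemma innerA (g0 : List (List String)) (c : Nat) (hc : ∀ row ∈ g0, c < row.length) :
    ∀ (m : Nat) (cc : List String) (cnt : Int), m ≤ g0.length → cc.length = g0.length →
    (m : Int) - 1 ≤ cnt → cnt < (g0.length : Int) →
    (PySem.List.pyRange ((m : Int) - 1) (-1) (-1)).foldl
      (fun (st : List (List String) × Int) row =>
        let counter := if pyCell st.1 row (c : Int) = "#" then row - 1 else st.2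
        if pyCell st.1 row (c : Int) = "O" then
          (pyPut (pyPut st.1 row (c : Int) ".") counter (c : Int) "O", counter - 1)
        else (st.1, counter))
      (writeCol g0 c cc, cnt)
    = (writeCol g0 c (loopA cc m cnt).1, (loopA cc m cnt).2) := by
  intro m
  induction m with
  | zero =>
      intro cc cnt _ _ _ _
      rw [PySem.List.pyRange_neg_one_eq_nil (by omega)]
      simp [loopA]
  | succ m ihm =>
      intro cc cnt hm hlen hc1 hc2
      have hmg : m < g0.length := by omega
      have hcons : PySem.List.pyRange (((m + 1 : Nat) : Int) - 1) (-1) (-1)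
          = ((m : Nat) : Int) :: PySem.List.pyRange (((m : Nat) : Int) - 1) (-1) (-1) := by
        rw [show (((m + 1 : Nat) : Int) - 1) = ((m : Nat) : Int) from by push_cast; ring]
        exact PySem.List.pyRange_neg_one_cons (by omega)
      rw [hcons, List.foldl_cons]
      have hcell := pyCell_writeCol g0 c cc hlen m hmg hc
      simp only [hcell]
      simp only [loopA]
      by_cases hO : cc.getD m "" = "O"
      · have hneq : cc.getD m "" ≠ "#" := by rw [hO]; decide
        simp only [if_neg hneq, if_pos hO]
        have hm0 : (0 : Int) ≤ (m : Nat) := by omega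
        have hcnn : (0 : Int) ≤ cnt := by omega
        rw [pyPut_writeCol g0 c cc hlen _ hm0]
        rw [show ((m : Nat) : Int).toNat = m from by omega]
        rw [pyPut_writeCol g0 c (cc.set m ".") (by simp [hlen]) _ hcnn]
        rw [ihm _ _ (by omega) (by simp [hlen]) (by omega) (by omega)]
      · simp only [if_neg hO]
        by_cases hH : cc.getD m "" = "#"
        · simp only [if_pos hH]
          rw [ihm _ _ (by omega) hlen (by omega) (by omega)]
        · simp only [if_neg hH]
          rw [ihm _ _ (by omega) hlen (by omega) (by omega)]

lemma writeLoop (c : Nat) (new : List String) :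
    ∀ (rest done : List (List String)) (vs : List String), vs.length = rest.length →
    (∀ t : Nat, t < rest.length → new.getD (done.length + t) "" = vs.getD t "") →
    (PySem.List.pyRange (done.length : Int) ((done.length : Int) + (rest.length : Int)) 1).foldl
      (fun g' r => pyPut g' r (c : Int) (PySem.List.pyGetD new r "")) (done ++ rest)
    = done ++ writeCol rest c vs := by
  intro rest
  induction rest with
  | nil =>
      intro done vs hlen _
      rw [PySem.List.pyRange_one_eq_nil (by simp)]
      have hv : vs = [] := by simp at hlen; exact hlen
      subst hv
      simp [writeCol]
  | cons row rest' ih =>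
      intro done vs hlen hvals
      rcases vs with _ | ⟨v0, vs'⟩
      · simp at hlen
      have hcons : PySem.List.pyRange (done.length : Int)
            ((done.length : Int) + ((row :: rest').length : Int)) 1
          = (done.length : Int) :: PySem.List.pyRange ((done.length : Int) + 1)
            ((done.length : Int) + ((row :: rest').length : Int)) 1 := by
        exact PySem.List.pyRange_one_cons (by simp)
      rw [hcons, List.foldl_cons]
      have hv0 : PySem.List.pyGetD new (done.length : Int) "" = v0 := by
        rw [PySem.List.pyGetD_natCast]
        have := hvals 0 (by simp)
        simpa using this
      have hput : pyPut (done ++ row :: rest') (done.length : Int) (c : Int)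
            (PySem.List.pyGetD new (done.length : Int) "")
          = (done ++ [row.set c v0]) ++ rest' := by
        rw [hv0]
        unfold pyPut
        rw [PySem.List.pyGetD_natCast, getD_at]
        rw [PySem.List.pySetD_natCast, PySem.List.pySetD_natCast]
        rw [set_at]
        simp
      rw [hput]
      have hrange : PySem.List.pyRange ((done.length : Int) + 1)
            ((done.length : Int) + ((row :: rest').length : Int)) 1
          = PySem.List.pyRange (((done ++ [row.set c v0]).length : Nat) : Int)
            ((((done ++ [row.set c v0]).length : Nat) : Int) + ((rest' : List (List String)).length : Int)) 1 := by
        congr 1 <;> (simp; try omega)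
      rw [hrange]
      rw [ih (done ++ [row.set c v0]) vs' (by simpa using hlen) (by
        intro t ht
        have := hvals (t + 1) (by simp; omega)
        rw [show (done ++ [row.set c v0]).length + t = done.length + (t + 1) from by simp; omega]
        simpa using this)]
      simp [writeCol]

lemma foldl_eq_of_inv {α β : Type} (Inv : α → Prop) (f g : α → β → α) (l : List β)
    (hstep : ∀ a b, Inv a → b ∈ l → f a b = g a b ∧ Inv (f a b)) :
    ∀ a, Inv a → l.foldl f a = l.foldl g a := by
  induction l with
  | nil => intro a _; rfl
  | cons x t ih =>
      intro a ha
      obtain ⟨heq, hinv⟩ := hstep a x ha (by simp)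
      simp only [List.foldl_cons, heq]
      exact ih (fun a b hA hB => hstep a b hA (by simp [hB])) _ (heq ▸ hinv)

-- ===== VERDICT (by name: the statement is the Claim_ definition above) =====
lemma step_eq (input : List (List String)) (hne : input ≠ [])
    (hrows : ∀ row ∈ input, (input.headD []).length ≤ row.length)
    (g : List (List String)) (c : Nat)
    (hInv : g.map List.length = input.map List.length)
    (hcU : c < (input.headD []).length) :
    (((PySem.List.pyRange (PySem.List.len g - 1) (-1) (-1)).foldl
        (fun (st : List (List String) × Int) row =>
          let counter := if pyCell st.1 row (c : Int) = "#" then row - 1 else st.2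
          if pyCell st.1 row (c : Int) = "O" then
            (pyPut (pyPut st.1 row (c : Int) ".") counter (c : Int) "O", counter - 1)
          else (st.1, counter))
        (g, PySem.List.len g - 1)).1)
    = writeCol g c (tiltCol (readCol g c)) := by
  have hcols : ∀ row ∈ g, c < row.length := by
    intro row hrow
    obtain ⟨j, hj, rfl⟩ := List.getElem_of_mem hrow
    have hglen : g.length = input.length := by
      have := congrArg List.length hInv; simpa using this
    have hjI : j < input.length := by omega
    have h2 : (g.map List.length)[j]? = (input.map List.length)[j]? := by rw [hInv]
    rw [List.getElem?_map, List.getElem?_map, List.getElem?_eq_getElem hj,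
      List.getElem?_eq_getElem hjI] at h2
    simp only [Option.map_some] at h2
    have h3 := hrows (input[j]) (List.getElem_mem hjI)
    have h4 : (g[j]).length = (input[j]).length := by simpa using h2
    omega
  have hA := innerA g c hcols g.length (readCol g c) ((g.length : Int) - 1) le_rfl
    (by simp [readCol]) (by omega) (by omega)
  rw [writeCol_readCol g c hcols] at hA
  simp only [PySem.List.len_eq]
  rw [hA]
  have hcolL : (readCol g c).length = g.length := by simp [readCol]
  have hTC : (loopA (readCol g c) g.length ((g.length : Int) - 1)).1 = tiltCol (readCol g c) := by
    have h := loopA_tiltCol (readCol g c)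
    rw [hcolL] at h
    exact h
  rw [hTC]

lemma stepB_eq (g : List (List String)) (c : Nat) (hcols : ∀ row ∈ g, c < row.length) :
    ((PySem.List.pyRange 0 (PySem.List.len g) 1).foldl
      (fun g' r => pyPut g' r (c : Int)
        (PySem.List.pyGetD (tiltCol (g.map (fun row => PySem.List.pyGetD row (c : Int) ""))) r "")) g)
    = writeCol g c (tiltCol (readCol g c)) := by
  have hmap : g.map (fun row => PySem.List.pyGetD row (c : Int) "") = readCol g c := by
    unfold readCol
    simp
  rw [hmap]
  have hW := writeLoop c (tiltCol (readCol g c)) g [] (tiltCol (readCol g c))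
    (by rw [length_tiltCol]; simp [readCol]) (by intro t ht; simp)
  simp only [List.nil_append, List.length_nil, Nat.cast_zero, zero_add] at hW
  rw [PySem.List.len_eq]
  exact hW

theorem tilt_down_spec : Claim_equal_tilt_down := by
  intro input _ hpre
  obtain ⟨hne, hrows⟩ := hpre
  unfold Spec_tilt_down tilt_down tilt_down_alt
  refine foldl_eq_of_inv (fun g => g.map List.length = input.map List.length) _ _ _ ?_ input rfl
  intro g b hInv hb
  rw [PySem.List.mem_pyRange_one] at hb
  obtain ⟨hb0, hbU⟩ := hb
  obtain ⟨c, rfl⟩ : ∃ c : Nat, b = (c : Int) := ⟨b.toNat, by omega⟩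
  have h0 : PySem.List.pyGetD input 0 [] = input.headD [] := by
    cases input with
    | nil => exact absurd rfl hne
    | cons a t => simp
  rw [h0, PySem.List.len_eq] at hbU
  have hcU : c < (input.headD []).length := by exact_mod_cast hbU
  have hcols : ∀ row ∈ g, c < row.length := by
    intro row hrow
    obtain ⟨j, hj, rfl⟩ := List.getElem_of_mem hrow
    have hglen : g.length = input.length := by
      have := congrArg List.length hInv; simpa using this
    have hjI : j < input.length := by omega
    have h2 : (g.map List.length)[j]? = (input.map List.length)[j]? := by rw [hInv]
    rw [List.getElem?_map, List.getElem?_map, List.getElem?_eq_getElem hj,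
      List.getElem?_eq_getElem hjI] at h2
    simp only [Option.map_some] at h2
    have h3 := hrows (input[j]) (List.getElem_mem hjI)
    have h4 : (g[j]).length = (input[j]).length := by simpa using h2
    omega
  have hsA := step_eq input hne hrows g c hInv hcU
  have hsB := stepB_eq g c hcols
  constructor
  · exact hsA.trans hsB.symm
  · show (((PySem.List.pyRange (PySem.List.len g - 1) (-1) (-1)).foldl _ (g, PySem.List.len g - 1)).1).map List.length = _
    rw [hsA]
    rw [map_length_writeCol g c _ (by rw [length_tiltCol]; simp [readCol])]
    exact hInv
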